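-- pv_equiv track=rewrite | github.com/EdLaughton/calibre-web-audit | hardcover_tools/core/audit_insights.py | build_reason_family_rollups
-- ===== SOURCE A (Python) =====
-- from typing import Any, Dict, List, Mapping, Optional, Sequence, Tuple
--
-- METADATA_CLEANUP_ACTIONS = {
--     "safe_auto_fix",
--     "update_calibre_metadata",
-- }
--
-- def row_value(row: Any, field_name: str, default: Any = "") -> Any:
--     if isinstance(row, Mapping):
--         return row.get(field_name, default)
--     return getattr(row, field_name, default)
--
-- def build_reason_family_rollups(
--     rows: Sequence[Any],
--     audit_actions: Optional[Sequence[Mapping[str, Any]]] = None,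
-- ) -> List[Tuple[str, int]]:
--     audit_actions = list(audit_actions or [])
--     duplicate_review_rows = sum(1 for row in audit_actions if str(row.get("review_source") or "") == "duplicate_review")
--     author_normalisation_review_rows = sum(
--         1 for row in audit_actions if str(row.get("review_source") or "") == "author_normalisation_review"
--     )
--     blank_language_guardrail_rows = sum(
--         1 for row in rows if "preferred_edition_blank_language" in str(row_value(row, "reason", "") or "")
--     )
--     default_ebook_gap_guardrail_rows = sum(
--         1
--         for row in rows
--         if "preferred_edition_differs_from_hardcover_default_ebook_with_narrow_gap"
--         in str(row_value(row, "reason", "") or "")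
--     )
--     relink_block_rows = sum(
--         1 for row in rows if str(row_value(row, "reason", "") or "").startswith("relink:block_")
--     )
--     title_metadata_cleanup_rows = sum(
--         1
--         for row in rows
--         if str(row_value(row, "recommended_action", "") or "") in METADATA_CLEANUP_ACTIONS
--         and str(row_value(row, "suggested_calibre_title", "") or "")
--         and str(row_value(row, "suggested_calibre_title", "") or "")
--         != str(row_value(row, "calibre_title", "") or "")
--     )
--     author_metadata_cleanup_rows = sum(
--         1
--         for row in rows
--         if str(row_value(row, "recommended_action", "") or "") == "update_calibre_metadata"
--         and str(row_value(row, "suggested_calibre_authors", "") or "")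
--         and str(row_value(row, "suggested_calibre_authors", "") or "")
--         != str(row_value(row, "calibre_authors", "") or "")
--     )
--     return [
--         ("Blank-language edition guardrails", blank_language_guardrail_rows),
--         ("Default-ebook gap guardrails", default_ebook_gap_guardrail_rows),
--         ("Relink-block rows", relink_block_rows),
--         ("Duplicate-review rows", duplicate_review_rows),
--         ("Author-normalisation review rows", author_normalisation_review_rows),
--         ("Title metadata cleanup rows", title_metadata_cleanup_rows),
--         ("Author metadata cleanup rows", author_metadata_cleanup_rows),
--     ]
-- ===== SOURCE B (Python) =====
-- METADATA_CLEANUP_ACTIONS = {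
--     "safe_auto_fix",
--     "update_calibre_metadata",
-- }
--
--
-- def row_value(row, field_name, default=""):
--     # rows here are mappings; first-match dict lookup with a default
--     return row.get(field_name, default)
--
--
-- def build_reason_family_rollups(rows, audit_actions=None):
--     blank = gap = relink = title = author = 0
--     for row in rows:
--         reason = str(row_value(row, "reason", "") or "")
--         action = str(row_value(row, "recommended_action", "") or "")
--         if "preferred_edition_blank_language" in reason:
--             blank += 1
--         if "preferred_edition_differs_from_hardcover_default_ebook_with_narrow_gap" in reason:
--             gap += 1
--         if reason.startswith("relink:block_"):
--             relink += 1
--         if action in METADATA_CLEANUP_ACTIONS: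
--             st = str(row_value(row, "suggested_calibre_title", "") or "")
--             if st and st != str(row_value(row, "calibre_title", "") or ""):
--                 title += 1
--         if action == "update_calibre_metadata":
--             sa = str(row_value(row, "suggested_calibre_authors", "") or "")
--             if sa and sa != str(row_value(row, "calibre_authors", "") or ""):
--                 author += 1
--     dup = norm = 0
--     for row in (audit_actions or []):
--         src = str(row.get("review_source") or "")
--         if src == "duplicate_review":
--             dup += 1
--         elif src == "author_normalisation_review":
--             norm += 1
--     return [
--         ("Blank-language edition guardrails", blank),
--         ("Default-ebook gap guardrails", gap),
--         ("Relink-block rows", relink),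
--         ("Duplicate-review rows", dup),
--         ("Author-normalisation review rows", norm),
--         ("Title metadata cleanup rows", title),
--         ("Author metadata cleanup rows", author),
--     ]
-- ===== Notes on version B (the rewrite author's own statement) =====
-- stated objective: simpler
-- what changed: Replaces A's seven separate filtered-sum comprehensions (five passes over rows, two over audit_actions) with one accumulator loop over rows and one over audit_actions, computing the reason/action fields once per row.
import Mathlib
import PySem

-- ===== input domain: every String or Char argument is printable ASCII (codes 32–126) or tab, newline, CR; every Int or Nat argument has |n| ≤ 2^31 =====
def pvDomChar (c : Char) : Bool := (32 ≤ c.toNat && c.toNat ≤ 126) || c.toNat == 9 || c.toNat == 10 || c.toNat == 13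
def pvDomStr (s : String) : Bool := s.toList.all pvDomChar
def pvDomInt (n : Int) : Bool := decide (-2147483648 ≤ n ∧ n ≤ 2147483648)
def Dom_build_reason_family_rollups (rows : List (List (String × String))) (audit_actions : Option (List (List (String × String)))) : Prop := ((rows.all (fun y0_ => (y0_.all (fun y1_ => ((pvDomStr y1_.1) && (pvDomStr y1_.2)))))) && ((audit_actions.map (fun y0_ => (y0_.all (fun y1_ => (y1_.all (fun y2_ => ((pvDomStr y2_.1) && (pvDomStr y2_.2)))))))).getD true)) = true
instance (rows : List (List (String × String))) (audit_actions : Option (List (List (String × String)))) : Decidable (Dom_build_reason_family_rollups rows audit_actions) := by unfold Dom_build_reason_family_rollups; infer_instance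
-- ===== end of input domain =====

-- B merges A's seven separate comprehension passes into one accumulator loop over `rows`
-- and one over `audit_actions` (objective: simpler — one pass per sequence instead of five/two).

-- ===== PORT A =====

-- METADATA_CLEANUP_ACTIONS = {"safe_auto_fix", "update_calibre_metadata"}
def METADATA_CLEANUP_ACTIONS : List String := PySem.Set.ofList ["safe_auto_fix", "update_calibre_metadata"]

-- row_value(row, field, ""): rows are dicts here, so row.get(field, "") (first match; "" if absent).
-- str(x or "") on a string x is x itself, so the coercion is the identity on this domain.
def rowGet (row : List (String × String)) (k : String) : String :=
  match row.find? (fun p => p.1 == k) with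
  | some p => p.2
  | none => ""

def build_reason_family_rollups (rows : List (List (String × String))) (audit_actions : Option (List (List (String × String)))) : List (String × Int) :=
  let acts := audit_actions.getD []
  let duplicate_review_rows : Int :=
    (acts.map (fun row => if rowGet row "review_source" == "duplicate_review" then (1 : Int) else 0)).sum
  let author_normalisation_review_rows : Int :=
    (acts.map (fun row => if rowGet row "review_source" == "author_normalisation_review" then (1 : Int) else 0)).sum
  let blank_language_guardrail_rows : Int :=
    (rows.map (fun row => if PySem.Str.isIn "preferred_edition_blank_language" (rowGet row "reason") then (1 : Int) else 0)).sum
  let default_ebook_gap_guardrail_rows : Int :=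
    (rows.map (fun row => if PySem.Str.isIn "preferred_edition_differs_from_hardcover_default_ebook_with_narrow_gap" (rowGet row "reason") then (1 : Int) else 0)).sum
  let relink_block_rows : Int :=
    (rows.map (fun row => if PySem.Str.startswith (rowGet row "reason") "relink:block_" then (1 : Int) else 0)).sum
  let title_metadata_cleanup_rows : Int :=
    (rows.map (fun row =>
      if METADATA_CLEANUP_ACTIONS.contains (rowGet row "recommended_action")
          && rowGet row "suggested_calibre_title" != ""
          && rowGet row "suggested_calibre_title" != rowGet row "calibre_title"
      then (1 : Int) else 0)).sum
  let author_metadata_cleanup_rows : Int :=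
    (rows.map (fun row =>
      if rowGet row "recommended_action" == "update_calibre_metadata"
          && rowGet row "suggested_calibre_authors" != ""
          && rowGet row "suggested_calibre_authors" != rowGet row "calibre_authors"
      then (1 : Int) else 0)).sum
  [ ("Blank-language edition guardrails", blank_language_guardrail_rows),
    ("Default-ebook gap guardrails", default_ebook_gap_guardrail_rows),
    ("Relink-block rows", relink_block_rows),
    ("Duplicate-review rows", duplicate_review_rows),
    ("Author-normalisation review rows", author_normalisation_review_rows),
    ("Title metadata cleanup rows", title_metadata_cleanup_rows),
    ("Author metadata cleanup rows", author_metadata_cleanup_rows) ]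

-- ===== PORT B =====

-- one step of B's single loop over rows: five accumulators
def altRowStep (acc : Int × Int × Int × Int × Int) (row : List (String × String)) : Int × Int × Int × Int × Int :=
  let reason := rowGet row "reason"
  let action := rowGet row "recommended_action"
  let (blank, gap, relink, title, author) := acc
  let blank := if PySem.Str.isIn "preferred_edition_blank_language" reason then blank + 1 else blank
  let gap := if PySem.Str.isIn "preferred_edition_differs_from_hardcover_default_ebook_with_narrow_gap" reason then gap + 1 else gap
  let relink := if PySem.Str.startswith reason "relink:block_" then relink + 1 else relink
  let title :=
    if METADATA_CLEANUP_ACTIONS.contains action then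
      let st := rowGet row "suggested_calibre_title"
      if st != "" && st != rowGet row "calibre_title" then title + 1 else title
    else title
  let author :=
    if action == "update_calibre_metadata" then
      let sa := rowGet row "suggested_calibre_authors"
      if sa != "" && sa != rowGet row "calibre_authors" then author + 1 else author
    else author
  (blank, gap, relink, title, author)

-- one step of B's loop over audit_actions: dup / norm accumulators (if / elif)
def altActStep (acc : Int × Int) (row : List (String × String)) : Int × Int :=
  let src := rowGet row "review_source"
  let (dup, norm) := acc
  if src == "duplicate_review" then (dup + 1, norm)
  else if src == "author_normalisation_review" then (dup, norm + 1)
  else (dup, norm)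

def build_reason_family_rollups_alt (rows : List (List (String × String))) (audit_actions : Option (List (List (String × String)))) : List (String × Int) :=
  let (blank, gap, relink, title, author) := rows.foldl altRowStep (0, 0, 0, 0, 0)
  let (dup, norm) := (audit_actions.getD []).foldl altActStep (0, 0)
  [ ("Blank-language edition guardrails", blank),
    ("Default-ebook gap guardrails", gap),
    ("Relink-block rows", relink),
    ("Duplicate-review rows", dup),
    ("Author-normalisation review rows", norm),
    ("Title metadata cleanup rows", title),
    ("Author metadata cleanup rows", author) ]

-- ===== PRECONDITION & SPEC =====
def Spec_build_reason_family_rollups (rows : List (List (String × String))) (audit_actions : Option (List (List (String × String)))) (out : List (String × Int)) : Prop := out = build_reason_family_rollups_alt rows audit_actions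
instance (rows : List (List (String × String))) (audit_actions : Option (List (List (String × String)))) (out : List (String × Int)) : Decidable (Spec_build_reason_family_rollups rows audit_actions out) := by unfold Spec_build_reason_family_rollups; infer_instance

-- ===== CLAIM (what is proved, stated in full; the proofs are below) =====
def Claim_equal_build_reason_family_rollups : Prop := ∀ (rows : List (List (String × String))) (audit_actions : Option (List (List (String × String)))), Dom_build_reason_family_rollups rows audit_actions → Spec_build_reason_family_rollups rows audit_actions (build_reason_family_rollups rows audit_actions)

-- ===== LEMMAS AND PROOFS =====

-- B's rows loop computes each of A's five row sums, shifted by the initial accumulator.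
theorem altRow_foldl (rows : List (List (String × String))) (a b c d e : Int) :
    rows.foldl altRowStep (a, b, c, d, e) =
      (a + (rows.map (fun row => if PySem.Str.isIn "preferred_edition_blank_language" (rowGet row "reason") then (1 : Int) else 0)).sum,
       b + (rows.map (fun row => if PySem.Str.isIn "preferred_edition_differs_from_hardcover_default_ebook_with_narrow_gap" (rowGet row "reason") then (1 : Int) else 0)).sum,
       c + (rows.map (fun row => if PySem.Str.startswith (rowGet row "reason") "relink:block_" then (1 : Int) else 0)).sum,
       d + (rows.map (fun row =>
          if METADATA_CLEANUP_ACTIONS.contains (rowGet row "recommended_action")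
              && rowGet row "suggested_calibre_title" != ""
              && rowGet row "suggested_calibre_title" != rowGet row "calibre_title"
          then (1 : Int) else 0)).sum,
       e + (rows.map (fun row =>
          if rowGet row "recommended_action" == "update_calibre_metadata"
              && rowGet row "suggested_calibre_authors" != ""
              && rowGet row "suggested_calibre_authors" != rowGet row "calibre_authors"
          then (1 : Int) else 0)).sum) := by
  induction rows generalizing a b c d e with
  | nil => simp
  | cons r rs ih =>
    simp only [List.foldl_cons, List.map_cons, List.sum_cons, altRowStep]
    rw [ih]
    generalize PySem.Str.isIn "preferred_edition_blank_language" (rowGet r "reason") = b1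
    generalize PySem.Str.isIn "preferred_edition_differs_from_hardcover_default_ebook_with_narrow_gap" (rowGet r "reason") = b2
    generalize PySem.Str.startswith (rowGet r "reason") "relink:block_" = b3
    generalize METADATA_CLEANUP_ACTIONS.contains (rowGet r "recommended_action") = b4
    generalize (rowGet r "suggested_calibre_title" != "") = b5
    generalize (rowGet r "suggested_calibre_title" != rowGet r "calibre_title") = b6
    generalize (rowGet r "recommended_action" == "update_calibre_metadata") = b7
    generalize (rowGet r "suggested_calibre_authors" != "") = b8
    generalize (rowGet r "suggested_calibre_authors" != rowGet r "calibre_authors") = b9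
    cases b1 <;> cases b2 <;> cases b3 <;> cases b4 <;> cases b5 <;> cases b6 <;> cases b7 <;> cases b8 <;> cases b9 <;>
      simp only [Bool.and_true, Bool.and_false, Bool.and_self, Bool.false_eq_true,
        if_true, if_false, Prod.mk.injEq] <;> omega

-- B's actions loop computes A's two action sums, shifted by the initial accumulator.
theorem altAct_foldl (acts : List (List (String × String))) (a b : Int) :
    acts.foldl altActStep (a, b) =
      (a + (acts.map (fun row => if rowGet row "review_source" == "duplicate_review" then (1 : Int) else 0)).sum,
       b + (acts.map (fun row => if rowGet row "review_source" == "author_normalisation_review" then (1 : Int) else 0)).sum) := by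
  induction acts generalizing a b with
  | nil => simp
  | cons r rs ih =>
    simp only [List.foldl_cons, List.map_cons, List.sum_cons, altActStep]
    rw [ih]
    simp only [beq_iff_eq]
    by_cases h1 : rowGet r "review_source" = "duplicate_review"
    · have h2 : ¬ rowGet r "review_source" = "author_normalisation_review" := by rw [h1]; decide
      simp only [if_pos h1, if_neg h2, Prod.mk.injEq]
      omega
    · by_cases h2 : rowGet r "review_source" = "author_normalisation_review"
      · simp only [if_neg h1, if_pos h2, Prod.mk.injEq]; omega
      · simp only [if_neg h1, if_neg h2, Prod.mk.injEq]; omega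

-- ===== VERDICT (by name: the statement is the Claim_ definition above) =====
theorem build_reason_family_rollups_spec : Claim_equal_build_reason_family_rollups := by
  intro rows audit_actions _
  unfold Spec_build_reason_family_rollups build_reason_family_rollups build_reason_family_rollups_alt
  rw [altRow_foldl, altAct_foldl]
  simp
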